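-- pv_equiv track=rewrite | github.com/ArjunSeeramsetty/Validatus2 | backend/app/services/analysis_optimization_service.py | _group_tasks_by_complexity
-- ===== SOURCE A (Python) =====
-- from typing import Dict, List, Any, Optional, Tuple
--
-- def _group_tasks_by_complexity(tasks: List[Dict[str, Any]]) -> Dict[str, List[Dict[str, Any]]]:
--     """Group tasks by computational complexity"""
--
--     groups = {
--         'light': [],      # Simple calculations, fast operations
--         'medium': [],     # Moderate AI inference, database queries
--         'heavy': [],      # Large language model operations, complex analysis
--         'io_bound': []    # Network requests, file operations
--     }
--
--     for task in tasks:
--         complexity = task.get('complexity', 'medium')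
--         if complexity in groups:
--             groups[complexity].append(task)
--         else:
--             groups['medium'].append(task)  # Default to medium
--
--     return {k: v for k, v in groups.items() if v}  # Remove empty groups
-- ===== SOURCE B (Python) =====
-- _ORDER = ['light', 'medium', 'heavy', 'io_bound']
-- _VALID = set(_ORDER)
--
-- def _norm(task):
--     c = task.get('complexity', 'medium')
--     return c if c in _VALID else 'medium'
--
-- def _group_tasks_by_complexity(tasks):
--     result = {}
--     for cat in _ORDER:
--         bucket = [t for t in tasks if _norm(t) == cat]
--         if bucket:
--             result[cat] = bucket
--     return result
-- ===== Notes on version B (the rewrite author's own statement) =====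
-- stated objective: alternative
-- what changed: Replaced the single distributing pass over a pre-seeded four-key dict with a normalizer plus one filtering scan per canonical category, adding only non-empty buckets as they are built.
import Mathlib
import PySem

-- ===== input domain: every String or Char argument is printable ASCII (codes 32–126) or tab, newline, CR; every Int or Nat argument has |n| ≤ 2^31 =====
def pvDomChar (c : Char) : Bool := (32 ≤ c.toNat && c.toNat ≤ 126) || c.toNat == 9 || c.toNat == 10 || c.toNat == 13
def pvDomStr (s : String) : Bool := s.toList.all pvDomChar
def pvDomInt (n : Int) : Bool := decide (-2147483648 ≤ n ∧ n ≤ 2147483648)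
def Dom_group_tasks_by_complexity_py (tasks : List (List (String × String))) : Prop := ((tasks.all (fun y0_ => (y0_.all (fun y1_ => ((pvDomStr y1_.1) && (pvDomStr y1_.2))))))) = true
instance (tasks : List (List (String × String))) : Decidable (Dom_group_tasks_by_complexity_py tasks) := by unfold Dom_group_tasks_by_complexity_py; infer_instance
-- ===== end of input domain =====

-- B: a normalizer plus one filtering scan per canonical category (alternative decomposition, same cost class).
-- ===== PORT A =====
abbrev pvTask := List (String × String)

def pvStepA (g : List pvTask × List pvTask × List pvTask × List pvTask) (task : pvTask) :
    List pvTask × List pvTask × List pvTask × List pvTask :=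
  let complexity := PySem.Dict.getD ⟨task⟩ "complexity" "medium"
  -- 'if complexity in groups' with the four fixed keys, 'else' defaults to medium
  if complexity = "light" then (g.1 ++ [task], g.2.1, g.2.2.1, g.2.2.2)
  else if complexity = "medium" then (g.1, g.2.1 ++ [task], g.2.2.1, g.2.2.2)
  else if complexity = "heavy" then (g.1, g.2.1, g.2.2.1 ++ [task], g.2.2.2)
  else if complexity = "io_bound" then (g.1, g.2.1, g.2.2.1, g.2.2.2 ++ [task])
  else (g.1, g.2.1 ++ [task], g.2.2.1, g.2.2.2)

def group_tasks_by_complexity_py (tasks : List (List (String × String))) : List (String × List (List (String × String))) :=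
  let g := tasks.foldl pvStepA ([], [], [], [])
  -- '{k: v for k, v in groups.items() if v}' over the dict's insertion order
  (if g.1 = [] then [] else [("light", g.1)]) ++
  (if g.2.1 = [] then [] else [("medium", g.2.1)]) ++
  (if g.2.2.1 = [] then [] else [("heavy", g.2.2.1)]) ++
  (if g.2.2.2 = [] then [] else [("io_bound", g.2.2.2)])

-- ===== PORT B =====
def pvNorm (task : pvTask) : String :=
  let c := PySem.Dict.getD ⟨task⟩ "complexity" "medium"
  if c ∈ ["light", "medium", "heavy", "io_bound"] then c else "medium"

def group_tasks_by_complexity_py_alt (tasks : List (List (String × String))) : List (String × List (List (String × String))) :=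
  ["light", "medium", "heavy", "io_bound"].foldl
    (fun res cat =>
      let bucket := tasks.filter (fun t => pvNorm t = cat)
      if bucket = [] then res else res ++ [(cat, bucket)]) []

-- ===== PRECONDITION & SPEC =====
def Spec_group_tasks_by_complexity_py (tasks : List (List (String × String))) (out : List (String × List (List (String × String)))) : Prop := out = group_tasks_by_complexity_py_alt tasks
instance (tasks : List (List (String × String))) (out : List (String × List (List (String × String)))) : Decidable (Spec_group_tasks_by_complexity_py tasks out) := by unfold Spec_group_tasks_by_complexity_py; infer_instance

-- ===== CLAIM (what is proved, stated in full; the proofs are below) =====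
def Claim_equal_group_tasks_by_complexity_py : Prop := ∀ (tasks : List (List (String × String))), Dom_group_tasks_by_complexity_py tasks → Spec_group_tasks_by_complexity_py tasks (group_tasks_by_complexity_py tasks)

-- ===== LEMMAS AND PROOFS =====
lemma pvFoldA_eq (ts : List pvTask) : ∀ (a b c d : List pvTask),
    ts.foldl pvStepA (a, b, c, d) =
      (a ++ ts.filter (fun t => pvNorm t = "light"),
       b ++ ts.filter (fun t => pvNorm t = "medium"),
       c ++ ts.filter (fun t => pvNorm t = "heavy"),
       d ++ ts.filter (fun t => pvNorm t = "io_bound")) := by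
  induction ts with
  | nil => simp
  | cons t ts ih =>
    intro a b c d
    simp only [List.foldl_cons, List.filter_cons]
    by_cases h1 : PySem.Dict.getD (PySem.Dict.mk t) "complexity" "medium" = "light" <;>
      by_cases h2 : PySem.Dict.getD (PySem.Dict.mk t) "complexity" "medium" = "medium" <;>
        by_cases h3 : PySem.Dict.getD (PySem.Dict.mk t) "complexity" "medium" = "heavy" <;>
          by_cases h4 : PySem.Dict.getD (PySem.Dict.mk t) "complexity" "medium" = "io_bound" <;>
            simp [pvStepA, pvNorm, h1, h2, h3, h4, ih, List.append_assoc]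

-- ===== VERDICT (by name: the statement is the Claim_ definition above) =====
theorem group_tasks_by_complexity_py_spec : Claim_equal_group_tasks_by_complexity_py := by
  intro tasks _
  unfold Spec_group_tasks_by_complexity_py
  unfold group_tasks_by_complexity_py group_tasks_by_complexity_py_alt
  rw [pvFoldA_eq]
  simp only [List.foldl_cons, List.foldl_nil, List.nil_append]
  split_ifs <;> simp_all
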